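-- pv_equiv track=rewrite | github.com/MrBrantCode/unitest_baseline | mut_generate/mist_train_taco/taco_11752/solution.py | check_berland_population
-- ===== SOURCE A (Python) =====
-- def check_berland_population(A):
--     p = []
--     c = 1
--     for _ in range(600):
--         p.append(c)
--         c *= 12
--
--     r = []
--     for i in range(600):
--         for j in range(i + 1):
--             if p[j] + p[i - j] == A:
--                 r.append(i + 1)
--                 break
--
--     s = set()
--     for i in r:
--         for j in range(i):
--             v = p[j] + p[i - 1 - j]
--             if v != A:
--                 s.add(v)
--
--     can_exist = len(r) > 0
--     years = r[:1000] if len(r) > 1000 else r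
--     other_variants = sorted(s)[:1000] if len(s) > 1000 else sorted(s)
--
--     return can_exist, years, other_variants
-- ===== SOURCE B (Python) =====
-- def check_berland_population(A):
--     # A is expressible as 12**a + 12**b iff its base-12 digits are either
--     # two 1s (at positions a < b) or a single 2 (a == b); read them off directly.
--     digs = []
--     n = A
--     while n > 0:
--         digs.append(n % 12)
--         n //= 12
--     nz = [(i, d) for i, d in enumerate(digs) if d]
--     if len(nz) == 2 and nz[0][1] == 1 and nz[1][1] == 1:
--         a, b = nz[0][0], nz[1][0]
--     elif len(nz) == 1 and nz[0][1] == 2: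
--         a, b = nz[0][0], nz[0][0]
--     else:
--         return False, [], []
--     y = a + b + 1
--     variants = sorted({12 ** j + 12 ** (y - 1 - j) for j in range(y)} - {A})
--     return True, [y], variants
-- ===== Notes on version B (the rewrite author's own statement) =====
-- stated objective: faster
-- what changed: B replaces A's 600x600 search over a table of six hundred huge powers of 12 by reading off A's base-12 digits: A is a sum of two powers of 12 iff its base-12 representation is two 1-digits or a single 2-digit, which gives the unique exponent pair directly; the variants are then computed from that single year.
import Mathlib
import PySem

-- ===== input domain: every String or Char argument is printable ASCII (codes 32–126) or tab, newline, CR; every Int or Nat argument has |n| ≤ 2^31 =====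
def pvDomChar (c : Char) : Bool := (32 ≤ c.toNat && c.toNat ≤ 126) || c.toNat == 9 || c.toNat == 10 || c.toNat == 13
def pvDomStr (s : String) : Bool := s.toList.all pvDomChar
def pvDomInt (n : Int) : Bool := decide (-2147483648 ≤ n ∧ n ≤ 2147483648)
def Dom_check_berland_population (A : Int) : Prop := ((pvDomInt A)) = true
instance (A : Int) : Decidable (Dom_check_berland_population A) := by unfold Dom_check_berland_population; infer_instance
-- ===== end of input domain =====

-- B replaces A's 600×600 pair search over a table of six hundred huge powers of 12 by
-- reading off A's base-12 digits (A is a sum of two powers of 12 iff the digits are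
-- two 1s or a single 2), which yields the exponent pair directly (objective: faster).

-- ===== PORT A =====
-- p: the 600 powers 12^0 .. 12^599
def pvA_p : List Int :=
  ((PySem.List.pyRange 0 600).foldl
    (fun (st : List Int × Int) _ => (st.1 ++ [st.2], st.2 * 12)) ([], 1)).1

-- r: years i+1 such that some j ≤ i has p[j] + p[i-j] == A
-- (Python's inner `for j in range(i+1): if …: append; break` appends i+1 once iff
--  some j matches, which is exactly `.any`; all p-indices are in range, so pyGetD is exact)
def pvA_r (A : Int) : List Int :=
  (PySem.List.pyRange 0 600).foldl (fun acc i =>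
    if (PySem.List.pyRange 0 (i + 1)).any (fun j =>
          PySem.List.pyGetD pvA_p j 0 + PySem.List.pyGetD pvA_p (i - j) 0 == A)
    then acc ++ [i + 1] else acc) []

-- s: the set of other variants p[j] + p[i-1-j] ≠ A for the years i in r
def pvA_s (A : Int) : PySem.Set Int :=
  (pvA_r A).foldl (fun s i =>
    (PySem.List.pyRange 0 i).foldl (fun s j =>
      let v := PySem.List.pyGetD pvA_p j 0 + PySem.List.pyGetD pvA_p (i - 1 - j) 0
      if v != A then PySem.Set.add s v else s) s) PySem.Set.empty

def check_berland_population (A : Int) : Bool × List Int × List Int :=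
  let r := pvA_r A
  let s := pvA_s A
  let can_exist := decide (0 < r.length)
  let years := if 1000 < r.length then PySem.List.slice r none (some 1000) else r
  let srt := PySem.List.sorted (s : List Int) (fun x => x)
  let other_variants := if 1000 < srt.length then PySem.List.slice srt none (some 1000) else srt
  (can_exist, years, other_variants)

-- ===== PORT B =====
-- the `while n > 0: digs.append(n % 12); n //= 12` loop; the fuel only makes the
-- loop total (64 iterations cover every |A| ≤ 2^31 of the stated domain and far beyond)
def pvB_digitsAux : Nat → Int → List Int
  | 0, _ => []
  | fuel + 1, n =>
    if 0 < n then PySem.Int.mod n 12 :: pvB_digitsAux fuel (PySem.Int.floordiv n 12) else []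

def pvB_digits (n : Int) : List Int := pvB_digitsAux 64 n

-- nz = [(i, d) for i, d in enumerate(digs) if d]
def pvB_nz (A : Int) : List (Int × Int) :=
  (PySem.List.enumerate (pvB_digits A) 0).filter (fun p => p.2 != 0)

-- the if/elif/else chain selecting the exponent pair (a, b), None when no pattern matches
def pvB_ab (A : Int) : Option (Int × Int) :=
  let nz := pvB_nz A
  if nz.length == 2 && (PySem.List.pyGetD nz 0 (0, 0)).2 == 1
      && (PySem.List.pyGetD nz 1 (0, 0)).2 == 1 then
    some ((PySem.List.pyGetD nz 0 (0, 0)).1, (PySem.List.pyGetD nz 1 (0, 0)).1)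
  else if nz.length == 1 && (PySem.List.pyGetD nz 0 (0, 0)).2 == 2 then
    some ((PySem.List.pyGetD nz 0 (0, 0)).1, (PySem.List.pyGetD nz 0 (0, 0)).1)
  else
    none

def check_berland_population_alt (A : Int) : Bool × List Int × List Int :=
  match pvB_ab A with
  | none => (false, [], [])
  | some (a, b) =>
    let y := a + b + 1
    let vs : PySem.Set Int :=
      (PySem.List.pyRange 0 y).foldl
        (fun s j => PySem.Set.add s ((12 : Int) ^ j.toNat + 12 ^ (y - 1 - j).toNat))
        PySem.Set.empty
    -- `sorted({…} - {A})`: removing the single element A from the set, then sorting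
    let variants := PySem.List.sorted (List.filter (fun v => v != A) (vs : List Int)) (fun x => x)
    (true, [y], variants)

-- ===== PRECONDITION & SPEC =====
def Spec_check_berland_population (A : Int) (out : Bool × List Int × List Int) : Prop := out = check_berland_population_alt A
instance (A : Int) (out : Bool × List Int × List Int) : Decidable (Spec_check_berland_population A out) := by unfold Spec_check_berland_population; infer_instance

-- ===== CLAIM (what is proved, stated in full; the proofs are below) =====
def Claim_equal_check_berland_population : Prop := ∀ (A : Int), Dom_check_berland_population A → Spec_check_berland_population A (check_berland_population A)

-- ===== LEMMAS AND PROOFS =====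

-- reference form of the matching years, shared by both sides of the proof
def pvCond (A : Int) (k : Nat) : Bool :=
  (List.range (k + 1)).any (fun j => ((12 : Int) ^ j + 12 ^ (k - j) == A))

def pvYears (A : Int) : List Int :=
  ((List.range 17).filter (pvCond A)).map (fun k : Nat => (k : Int) + 1)

-- the power table of port A
lemma pvA_p_aux (l : List Int) (acc : List Int) (c : Int) :
    l.foldl (fun (st : List Int × Int) _ => (st.1 ++ [st.2], st.2 * 12)) (acc, c)
      = (acc ++ (List.range l.length).map (fun k => c * 12 ^ k), c * 12 ^ l.length) := by
  induction l generalizing acc c with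
  | nil => simp
  | cons a l ih =>
      simp only [List.foldl_cons, ih, List.length_cons]
      rw [Prod.mk.injEq]
      constructor
      · rw [List.range_succ_eq_map]
        simp only [List.map_cons, List.map_map, pow_zero, mul_one, List.append_assoc,
          List.singleton_append]
        congr 2
        apply List.map_congr_left
        intro e _
        simp [Function.comp, pow_succ]
        ring
      · rw [pow_succ]; ring

lemma pvA_p_eq : pvA_p = (List.range 600).map (fun k => (12 : Int) ^ k) := by
  have := pvA_p_aux (PySem.List.pyRange 0 600) [] 1
  rw [pvA_p, this]
  simp [PySem.List.pyRange_one]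

lemma pvA_p_getD (t : Int) (h0 : 0 ≤ t) (h1 : t < 600) :
    PySem.List.pyGetD pvA_p t 0 = 12 ^ t.toNat := by
  rw [pvA_p_eq]
  rw [PySem.List.pyGetD_eq_getElem _ 0 h0 (by simp; omega)]
  rw [List.getElem_map, List.getElem_range]

-- under the domain bound, a matching pair of exponents is small
lemma pvExpBound (A : Int) (hA : A ≤ 2147483648) (x y : Nat)
    (h : (12 : Int) ^ x + 12 ^ y = A) : x ≤ 8 ∧ y ≤ 8 := by
  constructor
  · by_contra hx
    have h9 : (12 : Int) ^ 9 ≤ 12 ^ x := by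
      apply pow_le_pow_right₀ (by norm_num) (by omega)
    have hy : (0 : Int) < 12 ^ y := by positivity
    norm_num at h9
    omega
  · by_contra hy
    have h9 : (12 : Int) ^ 9 ≤ 12 ^ y := by
      apply pow_le_pow_right₀ (by norm_num) (by omega)
    have hx : (0 : Int) < 12 ^ x := by positivity
    norm_num at h9
    omega

lemma pvCond_iff (A : Int) (k : Nat) :
    pvCond A k = true ↔ ∃ j ≤ k, (12 : Int) ^ j + 12 ^ (k - j) = A := by
  simp [pvCond, List.any_eq_true]

-- the Boolean tested by port A's scan, as the reference condition
lemma pvCondA_eq (A : Int) (k : Nat) (hk : k < 600) :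
    ((PySem.List.pyRange 0 ((k : Int) + 1)).any (fun j =>
        PySem.List.pyGetD pvA_p j 0 + PySem.List.pyGetD pvA_p ((k : Int) - j) 0 == A))
      = pvCond A k := by
  rw [Bool.eq_iff_iff, pvCond_iff]
  simp only [List.any_eq_true, PySem.List.mem_pyRange_one, beq_iff_eq]
  constructor
  · rintro ⟨j, ⟨hj0, hj1⟩, hEq⟩
    refine ⟨j.toNat, by omega, ?_⟩
    rwa [pvA_p_getD j hj0 (by omega),
      show (k : Int) - j = ((k - j.toNat : Nat) : Int) by omega,
      pvA_p_getD _ (by omega) (by omega), Int.toNat_natCast] at hEq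
  · rintro ⟨j, hjk, hEq⟩
    refine ⟨(j : Int), ⟨by omega, by omega⟩, ?_⟩
    rw [pvA_p_getD _ (by omega) (by omega),
      show (k : Int) - (j : Int) = ((k - j : Nat) : Int) by omega,
      pvA_p_getD _ (by omega) (by omega), Int.toNat_natCast, Int.toNat_natCast]
    exact hEq

-- port A's year list equals the reference list
lemma pvA_r_eq (A : Int) (hA : A ≤ 2147483648) : pvA_r A = pvYears A := by
  unfold pvA_r
  rw [PySem.List.pyRange_one]
  simp only [zero_add, sub_zero, List.foldl_map]
  rw [show ((600 : Int)).toNat = 600 from rfl]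
  rw [PySem.List.foldl_append_if
    (fun k : Nat => (PySem.List.pyRange 0 ((k : Int) + 1)).any (fun j =>
        PySem.List.pyGetD pvA_p j 0 + PySem.List.pyGetD pvA_p ((k : Int) - j) 0 == A))
    (fun k : Nat => (k : Int) + 1)]
  rw [List.nil_append,
    List.filter_congr (fun k hk => pvCondA_eq A k (List.mem_range.mp hk))]
  rw [show (600 : Nat) = 17 + 583 by norm_num, List.range_add, List.filter_append]
  rw [show List.filter (pvCond A) ((List.range 583).map (fun x => 17 + x)) = [] from
    List.filter_eq_nil_iff.mpr ?_, List.append_nil]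
  · rfl
  · rintro a ha hc
    obtain ⟨x, hx, rfl⟩ := List.mem_map.mp ha
    obtain ⟨j, hjk, hEq⟩ := (pvCond_iff A _).mp hc
    have := pvExpBound A hA j ((17 + x) - j) hEq
    omega

-- ===== B-side: base-12 digits =====

-- value of a digit list, least significant first
def pvSumD : List Int → Int
  | [] => 0
  | d :: l => d + 12 * pvSumD l

lemma pvSumD_digitsAux (f : Nat) : ∀ n : Int, n < 12 ^ f →
    pvSumD (pvB_digitsAux f n) = max n 0 := by
  induction f with
  | zero =>
      intro n h
      norm_num at h
      simp [pvB_digitsAux, pvSumD]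
      omega
  | succ f ih =>
      intro n h
      rw [pvB_digitsAux]
      split_ifs with hn
      · have hd : PySem.Int.floordiv n 12 = n / 12 :=
          PySem.Int.floordiv_eq_ediv_of_pos (by norm_num)
        have hm : PySem.Int.mod n 12 = n % 12 :=
          PySem.Int.mod_eq_emod_of_pos (by norm_num)
        have ht : (0 : Int) < 12 ^ f := by positivity
        have h' : n < 12 * 12 ^ f := by rw [pow_succ] at h; omega
        rw [pvSumD, hd, hm, ih (n / 12) (by omega)]
        omega
      · simp [pvSumD]; omega

lemma pvSumD_digits (n : Int) (h : n ≤ 2147483648) :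
    pvSumD (pvB_digits n) = max n 0 := by
  apply pvSumD_digitsAux
  calc n ≤ 2147483648 := h
    _ < 12 ^ 9 := by norm_num
    _ ≤ 12 ^ 64 := by apply pow_le_pow_right₀ <;> norm_num

-- value of the nonzero positions of a digit list
def pvSumNZ : List (Int × Int) → Int
  | [] => 0
  | p :: l => p.2 * 12 ^ p.1.toNat + pvSumNZ l

lemma pvSumNZ_enum (l : List Int) : ∀ s : Nat,
    pvSumNZ ((PySem.List.enumerate l (s : Int)).filter (fun p => p.2 != 0))
      = 12 ^ s * pvSumD l := by
  induction l with
  | nil => intro s; simp [PySem.List.enumerate_nil, pvSumNZ, pvSumD]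
  | cons d l ih =>
      intro s
      rw [PySem.List.enumerate_cons,
        show (s : Int) + 1 = ((s + 1 : Nat) : Int) by push_cast; ring,
        List.filter_cons]
      by_cases hd : d = 0
      · subst hd
        simp only [bne_self_eq_false, if_false, Bool.false_eq_true]
        rw [ih (s + 1), pvSumD, pow_succ]
        ring
      · have : (((s : Int), d).2 != 0) = true := by simp [hd]
        rw [this, if_pos rfl, pvSumNZ, ih (s + 1), pvSumD, pow_succ]
        simp only [Int.toNat_natCast]
        ring

-- soundness of the digit-pattern test: a matched pair really decomposes A
lemma pvB_ab_sound (A : Int) (hA : A ≤ 2147483648) (a b : Int)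
    (h : pvB_ab A = some (a, b)) :
    ∃ p q : Nat, a = (p : Int) ∧ b = (q : Int) ∧ (12 : Int) ^ p + 12 ^ q = A := by
  have hsum : pvSumNZ (pvB_nz A) = max A 0 := by
    have := pvSumNZ_enum (pvB_digits A) 0
    simp only [pow_zero, one_mul, Nat.cast_zero] at this
    rw [pvB_nz, this, pvSumD_digits A hA]
  unfold pvB_ab at h
  simp only at h
  split_ifs at h with h1 h2
  · -- two digits equal to 1 at positions a < b
    simp only [Bool.and_eq_true, beq_iff_eq] at h1
    obtain ⟨⟨hlen, hg0⟩, hg1⟩ := h1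
    obtain ⟨p0, p1, hnz⟩ := List.length_eq_two.mp hlen
    rw [hnz] at hg0 hg1 h hsum
    have e0 : PySem.List.pyGetD [p0, p1] (0 : Int) ((0 : Int), (0 : Int)) = p0 := by
      simp [PySem.List.pyGetD, PySem.List.pyGet?, PySem.List.pyIdx?]
    have e1 : PySem.List.pyGetD [p0, p1] (1 : Int) ((0 : Int), (0 : Int)) = p1 := by
      simp [PySem.List.pyGetD, PySem.List.pyGet?, PySem.List.pyIdx?]
    rw [e0] at hg0
    rw [e1] at hg1
    rw [e0, e1] at h
    obtain ⟨rfl, rfl⟩ : p0.1 = a ∧ p1.1 = b := by simpa using h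
    -- positions come from enumerate, hence are natural numbers
    have hm0 : p0 ∈ pvB_nz A := by rw [hnz]; exact List.mem_cons_self
    have hm1 : p1 ∈ pvB_nz A := by rw [hnz]; simp
    have hm0' := List.mem_of_mem_filter hm0
    have hm1' := List.mem_of_mem_filter hm1
    rw [PySem.List.mem_enumerate_iff] at hm0' hm1'
    obtain ⟨k0, hk0, hp0⟩ := hm0'
    obtain ⟨k1, hk1, hp1⟩ := hm1'
    refine ⟨k0, k1, ?_, ?_, ?_⟩
    · rw [hp0]; simp
    · rw [hp1]; simp
    · rw [pvSumNZ, pvSumNZ, pvSumNZ, hg0, hg1] at hsum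
      rw [hp0, hp1] at hsum
      simp only [zero_add, Int.toNat_natCast] at hsum
      have c0 : (0 : Int) < 12 ^ k0 := by positivity
      have c1 : (0 : Int) < 12 ^ k1 := by positivity
      omega
  · -- one digit equal to 2 at position a = b
    simp only [Bool.and_eq_true, beq_iff_eq] at h2
    obtain ⟨hlen, hg0⟩ := h2
    obtain ⟨p0, hnz⟩ := List.length_eq_one_iff.mp hlen
    rw [hnz] at hg0 h hsum
    have e0 : PySem.List.pyGetD [p0] (0 : Int) ((0 : Int), (0 : Int)) = p0 := by
      simp [PySem.List.pyGetD, PySem.List.pyGet?, PySem.List.pyIdx?]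
    rw [e0] at h hg0
    obtain ⟨ha', hb'⟩ : p0.1 = a ∧ p0.1 = b := by simpa [eq_comm] using h
    subst ha'; subst hb'
    have hm0 : p0 ∈ pvB_nz A := by rw [hnz]; exact List.mem_cons_self
    have hm0' := List.mem_of_mem_filter hm0
    rw [PySem.List.mem_enumerate_iff] at hm0'
    obtain ⟨k0, hk0, hp0⟩ := hm0'
    refine ⟨k0, k0, ?_, ?_, ?_⟩
    · rw [hp0]; simp
    · rw [hp0]; simp
    · rw [pvSumNZ, pvSumNZ, hg0, hp0] at hsum
      simp only [zero_add, Int.toNat_natCast] at hsum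
      have c0 : (0 : Int) < 12 ^ k0 := by positivity
      omega

-- completeness of the digit-pattern test on the exponent range the domain allows
lemma pvB_ab_complete : ∀ x : Nat, x < 9 → ∀ y : Nat, y < 9 → x ≤ y →
    pvB_ab ((12 : Int) ^ x + 12 ^ y) = some ((x : Int), (y : Int)) := by decide

-- the reference year list of a decomposable A, computed once over the small range
lemma pvYears_pow : ∀ x : Nat, x < 9 → ∀ y : Nat, y < 9 → x ≤ y →
    pvYears ((12 : Int) ^ x + 12 ^ y) = [(x : Int) + (y : Int) + 1] := by decide

lemma pvYears_nil (A : Int) (hA : A ≤ 2147483648)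
    (hno : ¬ ∃ x y : Nat, x ≤ y ∧ y < 9 ∧ (12 : Int) ^ x + 12 ^ y = A) :
    pvYears A = [] := by
  unfold pvYears
  rw [List.map_eq_nil_iff, List.filter_eq_nil_iff]
  intro k hk hc
  obtain ⟨j, hjk, hEq⟩ := (pvCond_iff A k).mp hc
  have hb := pvExpBound A hA j (k - j) hEq
  rcases le_total j (k - j) with hle | hle
  · exact hno ⟨j, k - j, hle, by omega, hEq⟩
  · exact hno ⟨k - j, j, hle, by omega, by rw [add_comm]; exact hEq⟩

-- conditional insertion into a set = unconditional insertion followed by removal of A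
lemma pvFoldFilter (A : Int) (f : Int → Int) :
    ∀ (l : List Int) (s2 s1 : PySem.Set Int),
      s1 = List.filter (fun v => v != A) s2 →
      (l.foldl (fun s j => if f j != A then PySem.Set.add s (f j) else s) s1 : List Int)
        = List.filter (fun v => v != A)
            (l.foldl (fun s j => PySem.Set.add s (f j)) s2 : List Int) := by
  intro l
  induction l with
  | nil => intro s2 s1 h; simpa using h
  | cons j l ih =>
      intro s2 s1 h
      simp only [List.foldl_cons]
      apply ih
      by_cases hv : f j = A
      · rw [hv]
        simp only [bne_self_eq_false, if_false, Bool.false_eq_true]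
        rw [h, PySem.Set.add]
        split_ifs with hc
        · rfl
        · rw [List.filter_append]
          simp
      · have hbne : (f j != A) = true := by simp [hv]
        rw [hbne, if_pos rfl, h, PySem.Set.add, PySem.Set.add]
        have hmem : PySem.Set.contains (List.filter (fun v => v != A) s2) (f j)
            = PySem.Set.contains s2 (f j) := by
          by_cases hin : f j ∈ s2
          · simp [PySem.Set.contains, List.contains_eq_mem, List.mem_filter, hin, hv]
          · simp [PySem.Set.contains, List.contains_eq_mem, List.mem_filter, hin]
        rw [hmem]
        split_ifs with hc
        · rfl
        · rw [List.filter_append]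
          simp [hv]

-- a fold of set insertions grows the list by at most one element per step
lemma pvFoldAdd_len (f : Int → Int) :
    ∀ (l : List Int) (s : PySem.Set Int),
      (l.foldl (fun s j => PySem.Set.add s (f j)) s : List Int).length
        ≤ s.length + l.length := by
  intro l
  induction l with
  | nil => intro s; simp
  | cons j l ih =>
      intro s
      simp only [List.foldl_cons, List.length_cons]
      refine le_trans (ih _) ?_
      rw [PySem.Set.add]
      split_ifs
      · omega
      · simp; omega

-- ===== VERDICT helper: the two ports agree =====
lemma pvMain (A : Int) (hlo : -2147483648 ≤ A) (hhi : A ≤ 2147483648) :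
    check_berland_population A = check_berland_population_alt A := by
  by_cases hex : ∃ x y : Nat, x ≤ y ∧ y < 9 ∧ (12 : Int) ^ x + 12 ^ y = A
  · obtain ⟨x, y, hxy, hy9, hAeq⟩ := hex
    subst hAeq
    set A : Int := (12 : Int) ^ x + 12 ^ y with hAdef
    have hr : pvA_r A = [(x : Int) + (y : Int) + 1] := by
      rw [pvA_r_eq A hhi, pvYears_pow x (by omega) y hy9 hxy]
    have hab : pvB_ab A = some ((x : Int), (y : Int)) :=
      pvB_ab_complete x (by omega) y hy9 hxy
    set c : Int := (x : Int) + (y : Int) + 1 with hcdef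
    have hc0 : (0 : Int) < c := by positivity
    have hc17 : c ≤ 17 := by omega
    -- the A-side variant set, rewritten to B's shape
    have hs : (pvA_s A : List Int)
        = List.filter (fun v => v != A)
            ((PySem.List.pyRange 0 c).foldl
              (fun s j => PySem.Set.add s ((12 : Int) ^ j.toNat + 12 ^ (c - 1 - j).toNat))
              PySem.Set.empty : List Int) := by
      rw [pvA_s, hr]
      simp only [List.foldl_cons, List.foldl_nil]
      have hcong :
          List.foldl (fun (s : PySem.Set Int) j =>
              if (PySem.List.pyGetD pvA_p j 0 + PySem.List.pyGetD pvA_p (c - 1 - j) 0 != A)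
              then PySem.Set.add s (PySem.List.pyGetD pvA_p j 0 + PySem.List.pyGetD pvA_p (c - 1 - j) 0)
              else s) PySem.Set.empty (PySem.List.pyRange 0 c)
            = List.foldl (fun (s : PySem.Set Int) j =>
              if ((12 : Int) ^ j.toNat + 12 ^ (c - 1 - j).toNat != A)
              then PySem.Set.add s ((12 : Int) ^ j.toNat + 12 ^ (c - 1 - j).toNat)
              else s) PySem.Set.empty (PySem.List.pyRange 0 c) := by
        apply PySem.List.foldl_congr_mem
        intro acc v hv
        obtain ⟨hv0, hv1⟩ := (PySem.List.mem_pyRange_one).mp hv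
        rw [pvA_p_getD v hv0 (by omega), pvA_p_getD (c - 1 - v) (by omega) (by omega)]
      rw [hcong]
      exact pvFoldFilter A _ (PySem.List.pyRange 0 c) PySem.Set.empty PySem.Set.empty rfl
    -- length of the variant list is tiny
    have hslen : (pvA_s A : List Int).length ≤ 17 := by
      rw [hs]
      refine le_trans (List.length_filter_le _ _) ?_
      refine le_trans (pvFoldAdd_len _ _ _) ?_
      rw [PySem.List.pyRange_one]
      simp
      omega
    rw [check_berland_population, check_berland_population_alt, hab]
    simp only [hr]
    rw [if_neg (by simp), if_neg (by rw [PySem.List.length_sorted]; omega)]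
    refine Prod.ext (by simp) (Prod.ext rfl ?_)
    simp only []
    rw [hs]
  · -- no decomposition: both sides return (false, [], [])
    have hr : pvA_r A = [] := by
      rw [pvA_r_eq A hhi, pvYears_nil A hhi hex]
    have hab : pvB_ab A = none := by
      cases habs : pvB_ab A with
      | none => rfl
      | some p =>
          obtain ⟨a, b⟩ := p
          obtain ⟨pp, qq, _, _, hEq⟩ := pvB_ab_sound A hhi a b habs
          have hb := pvExpBound A hhi pp qq hEq
          rcases le_total pp qq with hle | hle
          · exact absurd ⟨pp, qq, hle, by omega, hEq⟩ hex
          · exact absurd ⟨qq, pp, hle, by omega, by rw [add_comm]; exact hEq⟩ hex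
    have hs : pvA_s A = PySem.Set.empty := by
      rw [pvA_s, hr]
      simp [PySem.Set.empty]
    rw [check_berland_population, check_berland_population_alt, hab]
    simp only [hr, hs]
    rfl

-- ===== VERDICT (by name: the statement is the Claim_ definition above) =====
theorem check_berland_population_spec : Claim_equal_check_berland_population := by
  intro A hA
  have h := of_decide_eq_true hA
  exact pvMain A h.1 h.2
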